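-- pv_equiv track=rewrite | github.com/slackjawed12/codetest | 프로그래머스/2/172927. 광물 캐기/광물 캐기.py | fatigue
-- ===== SOURCE A (Python) =====
-- def fatigue(pick, minerals):
--     if pick == 0:
--         return len(minerals)
--     elif pick == 1:
--         result = 0
--         for mineral in minerals:
--             if mineral == 'diamond':
--                 result += 5
--             else:
--                 result += 1
--         return result
--     else:
--         result = 0
--         for mineral in minerals:
--             if mineral == 'diamond':
--                 result += 25
--             elif mineral == 'iron':
--                 result += 5
--             else:
--                 result += 1
--
--         return result
-- ===== SOURCE B (Python) =====
-- def fatigue(pick, minerals):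
--     total = len(minerals)
--     if pick == 0:
--         return total
--     d = minerals.count('diamond')
--     if pick == 1:
--         return 5 * d + (total - d)
--     i = minerals.count('iron')
--     return 25 * d + 5 * i + (total - d - i)
-- ===== Notes on version B (the rewrite author's own statement) =====
-- stated objective: simpler
-- what changed: Replaces the per-element accumulation loops with category counts (len + two count() calls) combined by a closed-form arithmetic expression.
import Mathlib
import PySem

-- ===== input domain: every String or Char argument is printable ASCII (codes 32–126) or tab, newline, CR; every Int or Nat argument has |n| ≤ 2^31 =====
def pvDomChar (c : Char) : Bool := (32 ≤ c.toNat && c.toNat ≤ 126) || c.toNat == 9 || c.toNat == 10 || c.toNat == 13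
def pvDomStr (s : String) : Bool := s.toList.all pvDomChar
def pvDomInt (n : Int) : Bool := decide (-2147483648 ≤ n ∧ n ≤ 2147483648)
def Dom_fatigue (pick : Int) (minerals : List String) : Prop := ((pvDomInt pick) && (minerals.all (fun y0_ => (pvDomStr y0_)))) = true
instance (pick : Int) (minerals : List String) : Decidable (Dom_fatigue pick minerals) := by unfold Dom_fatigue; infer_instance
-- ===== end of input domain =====

-- ===== PORT A =====
-- B replaces the per-element loops with category counts combined arithmetically (simpler).
def fatigue (pick : Int) (minerals : List String) : Int :=
  if pick = 0 then (minerals.length : Int)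
  else if pick = 1 then
    minerals.foldl (fun result mineral => if mineral = "diamond" then result + 5 else result + 1) 0
  else
    minerals.foldl (fun result mineral =>
      if mineral = "diamond" then result + 25
      else if mineral = "iron" then result + 5
      else result + 1) 0

-- ===== PORT B =====
def fatigue_alt (pick : Int) (minerals : List String) : Int :=
  let total : Int := minerals.length
  if pick = 0 then total
  else
    let d : Int := PySem.List.count minerals "diamond"
    if pick = 1 then 5 * d + (total - d)
    else
      let i : Int := PySem.List.count minerals "iron"
      25 * d + 5 * i + (total - d - i)

-- ===== PRECONDITION & SPEC =====
def Spec_fatigue (pick : Int) (minerals : List String) (out : Int) : Prop := out = fatigue_alt pick minerals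
instance (pick : Int) (minerals : List String) (out : Int) : Decidable (Spec_fatigue pick minerals out) := by unfold Spec_fatigue; infer_instance

-- ===== CLAIM (what is proved, stated in full; the proofs are below) =====
def Claim_equal_fatigue : Prop := ∀ (pick : Int) (minerals : List String), Dom_fatigue pick minerals → Spec_fatigue pick minerals (fatigue pick minerals)

-- ===== LEMMAS AND PROOFS =====

-- ===== VERDICT (by name: the statement is the Claim_ definition above) =====
lemma loop1 (minerals : List String) (acc : Int) :
    minerals.foldl (fun result mineral => if mineral = "diamond" then result + 5 else result + 1) acc
      = acc + 5 * PySem.List.count minerals "diamond"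
        + ((minerals.length : Int) - PySem.List.count minerals "diamond") := by
  induction minerals generalizing acc with
  | nil => simp [PySem.List.count]
  | cons h t ih =>
    simp only [List.foldl_cons, ih, PySem.List.count, List.count_cons, List.length_cons]
    by_cases hd : h = "diamond" <;> simp [hd] <;> ring

lemma loop2 (minerals : List String) (acc : Int) :
    minerals.foldl (fun result mineral =>
      if mineral = "diamond" then result + 25
      else if mineral = "iron" then result + 5 else result + 1) acc
      = acc + 25 * PySem.List.count minerals "diamond" + 5 * PySem.List.count minerals "iron"
        + ((minerals.length : Int) - PySem.List.count minerals "diamond" - PySem.List.count minerals "iron") := by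
  induction minerals generalizing acc with
  | nil => simp [PySem.List.count]
  | cons h t ih =>
    simp only [List.foldl_cons, ih, PySem.List.count, List.count_cons, List.length_cons]
    by_cases hd : h = "diamond" <;> by_cases hi : h = "iron" <;>
      simp [hd, hi] <;> ring

theorem fatigue_spec : Claim_equal_fatigue := by
  intro pick minerals _
  unfold Spec_fatigue fatigue fatigue_alt
  by_cases h0 : pick = 0
  · simp [h0]
  · by_cases h1 : pick = 1 <;> simp [h0, h1, loop1, loop2]
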